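-- pv_equiv track=rewrite | github.com/sidwak/SEM_V | Codes/INS/INS_P5.py | fillmat
-- ===== SOURCE A (Python) =====
-- def fillmat(ptxt, mat, keylen):
--     ptxtlen = len(ptxt)
--     pos = 0
--     for i in range(keylen):
--         for j in range(keylen):
--             if pos < ptxtlen:
--                 mat[i][j] = ptxt[pos]
--                 pos += 1
--     return mat
-- ===== SOURCE B (Python) =====
-- def fillmat(ptxt, mat, keylen):
--     n = keylen * keylen if keylen > 0 else 0
--     for idx, ch in enumerate(ptxt[:n]):
--         q, r = divmod(idx, keylen)
--         mat[q][r] = ch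
--     return mat
-- ===== Notes on version B (the rewrite author's own statement) =====
-- stated objective: simpler
-- what changed: Replaced the nested i/j loops with a manual pos counter by a single pass over enumerate(ptxt[:keylen*keylen]) placing each character at divmod(idx, keylen); the Pre_ only excludes inputs where both programs raise IndexError because the matrix is too small for the characters to be placed.
import Mathlib
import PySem

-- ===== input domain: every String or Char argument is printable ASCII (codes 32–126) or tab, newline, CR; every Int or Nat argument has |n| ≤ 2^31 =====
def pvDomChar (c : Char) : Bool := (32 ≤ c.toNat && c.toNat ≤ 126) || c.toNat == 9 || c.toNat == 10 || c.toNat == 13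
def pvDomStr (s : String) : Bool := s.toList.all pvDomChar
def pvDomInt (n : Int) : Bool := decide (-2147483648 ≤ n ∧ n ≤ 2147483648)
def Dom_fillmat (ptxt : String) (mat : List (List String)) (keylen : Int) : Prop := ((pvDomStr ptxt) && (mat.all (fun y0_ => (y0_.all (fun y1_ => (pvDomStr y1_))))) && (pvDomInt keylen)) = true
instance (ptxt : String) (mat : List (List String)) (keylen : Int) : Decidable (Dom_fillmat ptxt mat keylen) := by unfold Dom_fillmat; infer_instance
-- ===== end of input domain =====

-- B replaces A's nested i/j loops with one pass over enumerate(ptxt[:keylen*keylen]) using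
-- divmod coordinate arithmetic (objective: simpler). Both Pythons mutate `mat` in place the
-- same way and return it; the theorems are about the returned value.

-- ===== PORT A =====
-- mat[i][j] = ptxt[pos]: the guard pos < ptxtlen plus Pre_ keep every index in range, so the
-- total forms pySetD/pyGetD/getD are exact there.
def fillmat (ptxt : String) (mat : List (List String)) (keylen : Int) : List (List String) :=
  let cs := ptxt.toList
  let ptxtlen := cs.length
  let st :=
    (PySem.List.pyRange 0 keylen 1).foldl (fun (st : List (List String) × Nat) i =>
      (PySem.List.pyRange 0 keylen 1).foldl (fun (st : List (List String) × Nat) j =>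
        if st.2 < ptxtlen then
          (PySem.List.pySetD st.1 i
            (PySem.List.pySetD (PySem.List.pyGetD st.1 i []) j (String.ofList [cs.getD st.2 ' '])),
           st.2 + 1)
        else st) st) (mat, 0)
  st.1

-- ===== PORT B =====
def fillmat_alt (ptxt : String) (mat : List (List String)) (keylen : Int) : List (List String) :=
  let n : Int := if keylen > 0 then keylen * keylen else 0
  (PySem.List.enumerate (PySem.List.slice ptxt.toList none (some n)) 0).foldl
    (fun m p =>
      let q := PySem.Int.floordiv p.1 keylen
      let r := PySem.Int.mod p.1 keylen
      PySem.List.pySetD m q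
        (PySem.List.pySetD (PySem.List.pyGetD m q []) r (String.ofList [p.2]))) mat

-- ===== PRECONDITION & SPEC =====
-- Pre_ excludes exactly the inputs where the Python A (and likewise B) raises IndexError:
-- some character would be placed at a row/column the matrix does not have.
def Pre_fillmat (ptxt : String) (mat : List (List String)) (keylen : Int) : Prop :=
  ∀ t : Nat, t < min ptxt.length (keylen.toNat * keylen.toNat) →
    t / keylen.toNat < mat.length ∧ t % keylen.toNat < (mat.getD (t / keylen.toNat) []).length
instance (ptxt : String) (mat : List (List String)) (keylen : Int) : Decidable (Pre_fillmat ptxt mat keylen) := by unfold Pre_fillmat; infer_instance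
def pvWitness_fillmat : String × List (List String) × Int := ("abc", [["x", "y"], ["z", "w"]], 2)
def Spec_fillmat (ptxt : String) (mat : List (List String)) (keylen : Int) (out : List (List String)) : Prop := out = fillmat_alt ptxt mat keylen
instance (ptxt : String) (mat : List (List String)) (keylen : Int) (out : List (List String)) : Decidable (Spec_fillmat ptxt mat keylen out) := by unfold Spec_fillmat; infer_instance

-- ===== CLAIM (what is proved, stated in full; the proofs are below) =====
def Claim_equal_fillmat : Prop := ∀ (ptxt : String) (mat : List (List String)) (keylen : Int), Dom_fillmat ptxt mat keylen → Pre_fillmat ptxt mat keylen → Spec_fillmat ptxt mat keylen (fillmat ptxt mat keylen)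

-- ===== LEMMAS AND PROOFS =====


-- helper used only by the proofs: one flat placement at flat index t
def pvCell (kn : Nat) (cs : List Char) (m : List (List String)) (t : Nat) : List (List String) :=
  m.set (t / kn) ((m.getD (t / kn) []).set (t % kn) (String.ofList [cs.getD t ' ']))

-- A's loop body, indexed by the flat index t (the row/col recovered by div/mod)
def pvStepA (L kn : Nat) (cs : List Char) (st : List (List String) × Nat) (t : Nat) :
    List (List String) × Nat :=
  if st.2 < L then
    (st.1.set (t / kn) ((st.1.getD (t / kn) []).set (t % kn) (String.ofList [cs.getD st.2 ' '])),
     st.2 + 1)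
  else st

theorem foldl_range_nest {σ : Type} (f : σ → Nat → σ) (a b : Nat) (init : σ) :
    (List.range a).foldl (fun s i => (List.range b).foldl (fun s j => f s (i * b + j)) s) init
      = (List.range (a * b)).foldl f init := by
  induction a generalizing init with
  | zero => simp
  | succ n ih =>
    rw [List.range_succ, List.foldl_append, ih, Nat.succ_mul, List.range_add,
      List.foldl_append, List.foldl_map]
    simp

theorem foldl_stepA (L kn : Nat) (cs : List Char) :
    ∀ (N : Nat) (m : List (List String)),
      (List.range N).foldl (pvStepA L kn cs) (m, 0)
        = ((List.range (min N L)).foldl (pvCell kn cs) m, min N L) := by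
  intro N m
  induction N with
  | zero => simp
  | succ n ih =>
    rw [List.range_succ, List.foldl_append, ih]
    by_cases h : n < L
    · have hmin : min n L = n := by omega
      have hmin' : min (n + 1) L = n + 1 := by omega
      rw [hmin, hmin']
      simp only [List.foldl_cons, List.foldl_nil, pvStepA]
      rw [if_pos h]
      rw [List.range_succ, List.foldl_append]
      simp [pvCell]
    · have hmin : min n L = L := by omega
      have hmin' : min (n + 1) L = L := by omega
      rw [hmin, hmin']
      simp only [List.foldl_cons, List.foldl_nil, pvStepA]
      rw [if_neg (by omega : ¬ L < L)]

theorem fillmat_main : ∀ (ptxt : String) (mat : List (List String)) (keylen : Int),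
    fillmat ptxt mat keylen = fillmat_alt ptxt mat keylen := by
  intro ptxt mat keylen
  by_cases hk : 0 < keylen
  · -- positive keylen
    set cs := ptxt.toList with hcs
    set L := cs.length with hL
    set kn := keylen.toNat with hkn
    have hkk : keylen = (kn : Int) := by omega
    have hknpos : 0 < kn := by omega
    -- A side: flatten the nested loops to one fold over List.range (kn * kn)
    have hA : fillmat ptxt mat keylen
        = ((List.range (kn * kn)).foldl (pvStepA L kn cs) (mat, 0)).1 := by
      simp only [fillmat]
      rw [hkk, PySem.List.pyRange_zero_natCast, List.foldl_map]
      rw [PySem.List.foldl_congr_mem _ _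
        (fun st (i : Nat) =>
          (List.range kn).foldl (fun st j => pvStepA L kn cs st (i * kn + j)) st) _
        (by
          intro acc i _
          rw [List.foldl_map]
          refine PySem.List.foldl_congr_mem _ _ _ _ ?_
          intro st j hj
          have hjlt : j < kn := List.mem_range.mp hj
          have hd : (i * kn + j) / kn = i := by
            rw [Nat.add_comm, Nat.add_mul_div_right _ _ hknpos, Nat.div_eq_of_lt hjlt]; omega
          have hm : (i * kn + j) % kn = j := by
            rw [Nat.add_comm, Nat.add_mul_mod_self_right, Nat.mod_eq_of_lt hjlt]
          simp only [pvStepA, hd, hm, PySem.List.pySetD_natCast, PySem.List.pyGetD_natCast]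
          rfl)]
      rw [foldl_range_nest]
    -- B side: one fold over List.range (min (kn * kn) L)
    have hB : fillmat_alt ptxt mat keylen
        = (List.range (min (kn * kn) L)).foldl (pvCell kn cs) mat := by
      simp only [fillmat_alt]
      rw [if_pos hk, hkk]
      have hmul : ((kn : Int) * (kn : Int)) = ((kn * kn : Nat) : Int) := by push_cast; ring
      rw [hmul, PySem.List.slice_to_natCast]
      set xs := cs.take (kn * kn) with hxs
      have hTlen : xs.length = min (kn * kn) L := by rw [hxs, List.length_take]
      rw [PySem.List.enumerate_eq_map_pyRange xs ' ']
      rw [show PySem.List.len xs = ((min (kn * kn) L : Nat) : Int) by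
        simp [PySem.List.len, hTlen]]
      rw [PySem.List.pyRange_zero_natCast, List.foldl_map, List.foldl_map]
      refine PySem.List.foldl_congr_mem _ _ _ _ ?_
      intro m t ht
      have htlt : t < min (kn * kn) L := List.mem_range.mp ht
      have hget : xs.getD t ' ' = cs.getD t ' ' := by
        rw [hxs]
        unfold List.getD
        rw [List.getElem?_take_of_lt (by omega)]
      simp only [PySem.Int.floordiv_natCast, PySem.Int.mod_natCast,
        PySem.List.pySetD_natCast, PySem.List.pyGetD_natCast, PySem.List.pyGetD_natCast,
        pvCell, hget]
    rw [hA, hB, foldl_stepA]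
  · -- keylen ≤ 0: A's ranges are empty, B's slice bound is 0
    simp only [fillmat, fillmat_alt]
    rw [PySem.List.pyRange_one_eq_nil (by omega), if_neg hk]
    simp [PySem.List.slice_to]

-- ===== VERDICT (by name: the statement is the Claim_ definition above) =====
theorem fillmat_spec : Claim_equal_fillmat := by
  intro ptxt mat keylen _ _
  exact fillmat_main ptxt mat keylen
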